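-- pv_equiv track=rewrite | github.com/derrynknife/RePyability | repyability/rbd/min_path_sets.py | merge_subproblem_solns
-- ===== SOURCE A (Python) =====
-- import itertools
-- from typing import Hashable
--
-- def get_node_in_combinations(n_in: int, k: int) -> list[tuple[int, ...]]:
--     """Returns all the indexed-0 node combinations for a k k-out-of-n node with
--     n_in predecessors
--
--     e.g. If the k-out-of-n node has k=2, and has 4 predecessors, this will
--     return [(0, 1), (0, 2), (0, 3), (1, 2), (1, 3), (2, 3)].
--     """
--     return list(itertools.combinations(range(n_in), k))
--
-- def merge_subproblem_solns(
--     all_subproblem_solns: list[list[set[Hashable]]], curr_node_k: int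
-- ) -> list[set[Hashable]]:
--     """Returns k-wise path-set combinations for the current node"""
--     # First get the node-in combinations
--     n_in = len(all_subproblem_solns)
--     combs = get_node_in_combinations(n_in, curr_node_k)
--
--     # Then form the path-set combinations (or set-additions rather)
--
--     merged_soln: list[set] = []
--     for comb in combs:
--         # product_candidates are all the subproblem solns we're considering for
--         # this combination
--         product_candidates: list[list[set]] = [
--             all_subproblem_solns[i] for i in comb
--         ]
--
--         # itertools.product() performs all the magic for us, basically
--         # getting us the '(aa, ab, ba, bb)' we need
--         for product_tup in itertools.product(*product_candidates):
--             # Now merge the sets, i.e. ({1, 2}, {3, 4}) -> {1, 2, 3, 4}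
--             s = set(product_tup[0])
--             for i in range(1, len(product_tup)):
--                 s |= product_tup[i]
--
--             # And add it to the merged_soln list
--             merged_soln.append(s)
--
--     return merged_soln
-- ===== SOURCE B (Python) =====
-- def merge_subproblem_solns(all_subproblem_solns, curr_node_k):
--     """Returns k-wise path-set combinations for the current node.
--
--     Dynamic programming instead of itertools: sweep the predecessor list
--     right-to-left keeping a table T where T[j] is the list of per-combination
--     blocks of chosen-soln tuples picking j predecessors from the suffix
--     processed so far.  Each row either heads every tuple of a (j-1)-block or
--     is skipped, so no index combinations and no itertools.product calls are
--     ever made; shared suffix blocks are computed once, not per combination."""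
--     k = curr_node_k
--     if k < 0 or k > len(all_subproblem_solns):
--         return []  # no k-combination exists
--     # T[j]: blocks of tuples choosing j rows from the current suffix
--     T = [[[[]]]] + [[] for _ in range(k)]
--     for row in reversed(all_subproblem_solns):
--         for j in range(k, 0, -1):
--             T[j] = [[[a] + tup for a in row for tup in blk]
--                     for blk in T[j - 1]] + T[j]
--
--     def merge(tup):
--         s = set(tup[0]) if tup else set()
--         for t in tup[1:]:
--             s |= t
--         return s
--
--     return [merge(tup) for blk in T[k] for tup in blk]
-- ===== Notes on version B (the rewrite author's own statement) =====
-- stated objective: alternative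
-- what changed: Replaces the combinations-then-Cartesian-product enumeration by a right-to-left dynamic-programming sweep over the predecessor list: a table T where T[j] holds the per-combination blocks of chosen-soln tuples picking j predecessors from the suffix, each row either heading every tuple of the (j-1)-entry or being skipped; no index combinations are formed and no itertools calls are made, and shared suffix blocks are computed once instead of once per combination.
import Mathlib
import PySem

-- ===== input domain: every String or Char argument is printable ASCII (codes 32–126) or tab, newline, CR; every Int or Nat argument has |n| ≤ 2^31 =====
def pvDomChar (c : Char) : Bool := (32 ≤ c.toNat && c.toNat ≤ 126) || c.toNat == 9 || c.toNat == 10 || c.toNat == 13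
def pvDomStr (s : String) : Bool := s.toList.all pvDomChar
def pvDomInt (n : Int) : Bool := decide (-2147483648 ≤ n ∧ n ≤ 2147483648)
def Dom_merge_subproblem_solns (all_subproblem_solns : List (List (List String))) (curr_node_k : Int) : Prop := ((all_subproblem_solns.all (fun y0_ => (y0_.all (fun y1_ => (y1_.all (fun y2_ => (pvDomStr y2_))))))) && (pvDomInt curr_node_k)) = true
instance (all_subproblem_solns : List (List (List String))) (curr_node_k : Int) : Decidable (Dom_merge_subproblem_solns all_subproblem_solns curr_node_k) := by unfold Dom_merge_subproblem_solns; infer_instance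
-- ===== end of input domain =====

-- B fuses the choice of a k-combination with the Cartesian product into one recursion over the
-- predecessor list (take-the-head or skip-the-head), never materialising index combinations or
-- product tuples; alternative decomposition, same cost.


-- ===== PORT A =====
-- itertools.combinations(range(n), k) over an explicit index list, lexicographic order (exact)
def pyCombinations : List Nat → Nat → List (List Nat)
  | _, 0 => [[]]
  | [], _ + 1 => []
  | x :: xs, k + 1 => ((pyCombinations xs k).map (fun c => x :: c)) ++ pyCombinations xs (k + 1)

-- itertools.product(*lists): rightmost factor varies fastest (exact emission order)
def pyProduct : List (List (List String)) → List (List (List String))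
  | [] => [[]]
  | l :: ls => l.flatMap (fun x => (pyProduct ls).map (fun tup => x :: tup))

def merge_subproblem_solns (all_subproblem_solns : List (List (List String))) (curr_node_k : Int) : List (List String) :=
  let n_in := all_subproblem_solns.length
  let combs := pyCombinations (List.range n_in) curr_node_k.toNat
  combs.foldl (fun merged_soln comb =>
    let product_candidates := comb.map (fun i => all_subproblem_solns.getD i [])
    (pyProduct product_candidates).foldl (fun merged_soln product_tup =>
      -- s = set(product_tup[0]); for i in range(1, len): s |= product_tup[i]
      -- (product_tup is nonempty on Pre_, where curr_node_k >= 1)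
      let s := PySem.Set.ofList (product_tup.headD [])
      let s := (product_tup.drop 1).foldl (fun s t => PySem.Set.union s t) s
      merged_soln ++ [s]) merged_soln) []

-- ===== PORT B =====
-- solve(solns, k): one block of merged unions per k-combination of solns;
-- for the head predecessor either take it (pair each of its solns with every
-- merged soln of k-1 picks from the rest) or skip it.
def solveB : List (List (List String)) → Int → List (List (List String))
  | solns, k =>
    if k = 0 then [[[]]]
    else if k < 0 ∨ (solns.length : Int) < k then []
    else
      match solns with
      | [] => []
      | first :: rest =>
        ((solveB rest (k - 1)).map (fun blk =>
          first.flatMap (fun a => blk.map (fun s => PySem.Set.union (PySem.Set.ofList a) s)))) ++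
        solveB rest k

def merge_subproblem_solns_alt (all_subproblem_solns : List (List (List String))) (curr_node_k : Int) : List (List String) :=
  (solveB all_subproblem_solns curr_node_k).flatMap (fun blk => blk)

-- ===== PRECONDITION & SPEC =====
-- Pre_ excludes exactly the inputs on which Python A raises: curr_node_k = 0 (IndexError on
-- product_tup[0] of the empty tuple) and curr_node_k < 0 (ValueError from itertools.combinations).
def Pre_merge_subproblem_solns (all_subproblem_solns : List (List (List String))) (curr_node_k : Int) : Prop :=
  1 ≤ curr_node_k
instance (all_subproblem_solns : List (List (List String))) (curr_node_k : Int) : Decidable (Pre_merge_subproblem_solns all_subproblem_solns curr_node_k) := by unfold Pre_merge_subproblem_solns; infer_instance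

def pvWitness_merge_subproblem_solns : List (List (List String)) × Int := ([[["a"], ["b", "c"]], [["d"]]], 2)

def Spec_merge_subproblem_solns (all_subproblem_solns : List (List (List String))) (curr_node_k : Int) (out : List (List String)) : Prop := out = merge_subproblem_solns_alt all_subproblem_solns curr_node_k
instance (all_subproblem_solns : List (List (List String))) (curr_node_k : Int) (out : List (List String)) : Decidable (Spec_merge_subproblem_solns all_subproblem_solns curr_node_k out) := by unfold Spec_merge_subproblem_solns; infer_instance

-- ===== CLAIM (what is proved, stated in full; the proofs are below) =====
def Claim_equal_merge_subproblem_solns : Prop := ∀ (all_subproblem_solns : List (List (List String))) (curr_node_k : Int), Dom_merge_subproblem_solns all_subproblem_solns curr_node_k → Pre_merge_subproblem_solns all_subproblem_solns curr_node_k → Spec_merge_subproblem_solns all_subproblem_solns curr_node_k (merge_subproblem_solns all_subproblem_solns curr_node_k)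
-- ===== LEMMAS AND PROOFS =====

-- A's merge of one product tuple: set(tup[0]) |= tup[1] |= …
def mergeA (tup : List (List String)) : List String :=
  (tup.drop 1).foldl (fun s t => PySem.Set.union s t) (PySem.Set.ofList (tup.headD []))

-- combinations of the candidate lists themselves (proof-side view of A's index combinations)
def combL : List (List (List String)) → Nat → List (List (List (List String)))
  | _, 0 => [[]]
  | [], _ + 1 => []
  | x :: xs, k + 1 => ((combL xs k).map (fun c => x :: c)) ++ combL xs (k + 1)

theorem mem_foldl_add {α : Type} [BEq α] [LawfulBEq α] (q : List α) :
    ∀ (s : List α) (x : α), x ∈ q.foldl PySem.Set.add s ↔ x ∈ s ∨ x ∈ q := by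
  induction q with
  | nil => simp
  | cons y q ih =>
    intro s x
    rw [List.foldl_cons, ih]
    simp [PySem.Set.mem_add, or_assoc]

theorem foldl_add_add (q : List String) : ∀ (s : List String) (x : String),
    (PySem.Set.add q x).foldl PySem.Set.add s = PySem.Set.add (q.foldl PySem.Set.add s) x := by
  intro s x
  by_cases hx : x ∈ q
  · have h1 : PySem.Set.add q x = q := by
      simp [PySem.Set.add, List.contains_eq_mem, hx]
    have h2 : PySem.Set.add (q.foldl PySem.Set.add s) x = q.foldl PySem.Set.add s := by
      simp [PySem.Set.add, List.contains_eq_mem, (mem_foldl_add q s x).mpr (Or.inr hx)]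
    rw [h1, h2]
  · have h1 : PySem.Set.add q x = q ++ [x] := by
      simp [PySem.Set.add, List.contains_eq_mem, hx]
    rw [h1, List.foldl_append, List.foldl_cons, List.foldl_nil]

theorem foldl_add_assoc (t : List String) : ∀ (q s : List String),
    List.foldl PySem.Set.add s (List.foldl PySem.Set.add q t)
      = List.foldl PySem.Set.add (List.foldl PySem.Set.add s q) t := by
  induction t with
  | nil => intro q s; rfl
  | cons x ts ih =>
    intro q s
    rw [List.foldl_cons, List.foldl_cons, ih (PySem.Set.add q x) s, foldl_add_add]

theorem union_eq_foldl_add (s t : List String) :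
    PySem.Set.union s t = t.foldl PySem.Set.add s := rfl

theorem union_assoc' (s q t : List String) :
    PySem.Set.union s (PySem.Set.union q t) = PySem.Set.union (PySem.Set.union s q) t := by
  rw [union_eq_foldl_add, union_eq_foldl_add q t, union_eq_foldl_add, union_eq_foldl_add s q]
  exact foldl_add_assoc t q s

theorem union_ofList (s t : List String) :
    PySem.Set.union s (PySem.Set.ofList t) = PySem.Set.union s t := by
  have h1 : PySem.Set.ofList t = PySem.Set.union ([] : List String) t := rfl
  rw [h1, union_assoc']
  rfl

theorem union_foldl_union (ts : List (List String)) : ∀ (s X : List String),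
    PySem.Set.union s (ts.foldl (fun acc t => PySem.Set.union acc t) X)
      = ts.foldl (fun acc t => PySem.Set.union acc t) (PySem.Set.union s X) := by
  induction ts with
  | nil => intro s X; rfl
  | cons t ts ih =>
    intro s X
    rw [List.foldl_cons, List.foldl_cons, ih, union_assoc']

theorem mergeA_cons (a : List String) (tup : List (List String)) :
    mergeA (a :: tup) = PySem.Set.union (PySem.Set.ofList a) (mergeA tup) := by
  cases tup with
  | nil => rfl
  | cons t ts =>
    show (t :: ts).foldl (fun s t => PySem.Set.union s t) (PySem.Set.ofList a)
        = PySem.Set.union (PySem.Set.ofList a) (ts.foldl (fun s t => PySem.Set.union s t) (PySem.Set.ofList t))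
    rw [List.foldl_cons, union_foldl_union, union_ofList]

theorem pyCombinations_map (f : Nat → Nat) (l : List Nat) : ∀ (k : Nat),
    pyCombinations (l.map f) k = (pyCombinations l k).map (List.map f) := by
  induction l with
  | nil => intro k; cases k <;> rfl
  | cons x xs ih =>
    intro k
    cases k with
    | zero => rfl
    | succ m =>
      rw [List.map_cons, pyCombinations, pyCombinations, ih m, ih (m + 1)]
      simp [List.map_map, Function.comp_def]

theorem combL_eq_nil_of_lt (solns : List (List (List String))) : ∀ (m : Nat), solns.length < m →
    combL solns m = [] := by
  induction solns with
  | nil => intro m hm; obtain ⟨j, rfl⟩ : ∃ j, m = j + 1 := ⟨m - 1, by omega⟩; rfl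
  | cons x xs ih =>
    intro m hm
    obtain ⟨j, rfl⟩ : ∃ j, m = j + 1 := ⟨m - 1, by omega⟩
    simp only [List.length_cons] at hm
    rw [combL, ih j (by omega), ih (j + 1) (by omega), List.map_nil, List.nil_append]

-- A's index combinations, looked up in the list, are exactly combL
theorem combs_lookup (solns : List (List (List String))) : ∀ (k : Nat),
    (pyCombinations (List.range solns.length) k).map (fun c => c.map (fun i => solns.getD i []))
      = combL solns k := by
  induction solns with
  | nil =>
    intro k
    cases k with
    | zero => simp [pyCombinations, combL]
    | succ m => simp [pyCombinations, combL]
  | cons x xs ih =>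
    intro k
    cases k with
    | zero => simp [pyCombinations, combL]
    | succ m =>
      rw [List.length_cons, List.range_succ_eq_map, pyCombinations,
        pyCombinations_map Nat.succ (List.range xs.length) m,
        pyCombinations_map Nat.succ (List.range xs.length) (m + 1),
        combL, List.map_append, ← ih m, ← ih (m + 1)]
      simp [List.map_map, Function.comp_def]

-- B's recursion computes, per combination, exactly A's merged product block
theorem solveB_eq (solns : List (List (List String))) : ∀ (k : Int), 0 ≤ k →
    solveB solns k = (combL solns k.toNat).map (fun cands => (pyProduct cands).map mergeA) := by
  induction solns with
  | nil =>
    intro k hk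
    rw [solveB]
    by_cases h : k = 0
    · subst h; rfl
    · rw [if_neg h, if_pos (by simp; omega)]
      have : k.toNat = (k.toNat - 1) + 1 := by omega
      rw [this, combL, List.map_nil]
  | cons x xs ih =>
    intro k hk
    rw [solveB]
    by_cases h : k = 0
    · subst h; rfl
    · rw [if_neg h]
      by_cases hbig : ((x :: xs).length : Int) < k
      · rw [if_pos (Or.inr hbig), combL_eq_nil_of_lt _ k.toNat (by simp at hbig ⊢; omega),
          List.map_nil]
      · rw [if_neg (by omega)]
        obtain ⟨m, hm⟩ : ∃ m, k.toNat = m + 1 := ⟨k.toNat - 1, by omega⟩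
        rw [ih (k - 1) (by omega), ih k hk, hm, combL]
        have h1 : (k - 1).toNat = m := by omega
        rw [h1, List.map_append]
        simp only [List.map_map]
        congr 1
        apply List.map_congr_left
        intro c _
        simp only [Function.comp_def, pyProduct, List.map_flatMap, List.map_map]
        apply List.flatMap_congr
        intro a _
        apply List.map_congr_left
        intro tup _
        exact (mergeA_cons a tup).symm

-- ===== VERDICT (by name: the statement is the Claim_ definition above) =====
theorem merge_subproblem_solns_spec : Claim_equal_merge_subproblem_solns := by
  intro solns k _ hpre
  unfold Spec_merge_subproblem_solns merge_subproblem_solns merge_subproblem_solns_alt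
  show List.foldl (fun merged_soln comb =>
      List.foldl (fun m tup => m ++ [mergeA tup]) merged_soln
        (pyProduct (comb.map (fun i => solns.getD i []))))
      [] (pyCombinations (List.range solns.length) k.toNat) = _
  rw [solveB_eq solns k (by exact le_trans (by norm_num) hpre), ← combs_lookup solns k.toNat]
  simp only [PySem.List.foldl_append_singleton_eq_map]
  rw [PySem.List.foldl_append_eq_flatMap]
  simp only [List.flatMap_map, List.nil_append]
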